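-- pv_equiv track=rewrite | github.com/hrlmartins/advent-of-code | 2024/06/main.py | next_guard_position
-- ===== SOURCE A (Python) =====
-- def next_guard_position(lab, obstacles, facing_direction, guard_position):
--     row_pos, col_pos = guard_position
--     directions = {
--         "UP": (
--             lambda obs: obs[0] < row_pos and obs[1] == col_pos,
--             lambda: (0, col_pos),
--             lambda obs: max(obs, key=lambda x: x[0]),
--             lambda obs: (obs[0] + 1, obs[1]),
--         ),
--         "DOWN": (
--             lambda obs: obs[0] > row_pos and obs[1] == col_pos,
--             lambda: (len(lab) - 1, col_pos),
--             lambda obs: min(obs, key=lambda x: x[0]),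
--             lambda obs: (obs[0] - 1, obs[1]),
--         ),
--         "LEFT": (
--             lambda obs: obs[1] < col_pos and obs[0] == row_pos,
--             lambda: (row_pos, 0),
--             lambda obs: max(obs, key=lambda x: x[1]),
--             lambda obs: (obs[0], obs[1] + 1),
--         ),
--         "RIGHT": (
--             lambda obs: obs[1] > col_pos and obs[0] == row_pos,
--             lambda: (row_pos, len(lab[0]) - 1),
--             lambda obs: min(obs, key=lambda x: x[1]),
--             lambda obs: (obs[0], obs[1] - 1),
--         ),
--     }
--
--     is_obstacle_valid, edge_position, nearest_obstacle, next_position = directions[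
--         facing_direction
--     ]
--
--     possible_obstacles = [obs for obs in obstacles if is_obstacle_valid(obs)]
--     return (
--         edge_position()
--         if not possible_obstacles
--         else next_position(nearest_obstacle(possible_obstacles))
--     )
-- ===== SOURCE B (Python) =====
-- def next_guard_position(lab, obstacles, facing_direction, guard_position):
--     # canonical frame: u = signed coordinate along the facing axis (guard moves toward smaller u)
--     if facing_direction == "UP":
--         axis, sign = 0, 1
--     elif facing_direction == "DOWN":
--         axis, sign = 0, -1
--     elif facing_direction == "LEFT":
--         axis, sign = 1, 1
--     elif facing_direction == "RIGHT":
--         axis, sign = 1, -1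
--     else:
--         raise KeyError(facing_direction)
--     gu = sign * guard_position[axis]
--     gv = guard_position[1 - axis]
--     line = sorted(sign * o[axis] for o in obstacles if o[1 - axis] == gv)
--     # bisect_left by hand: lo = first index with line[lo] >= gu
--     lo, hi = 0, len(line)
--     while lo < hi:
--         mid = (lo + hi) // 2
--         if line[mid] < gu:
--             lo = mid + 1
--         else:
--             hi = mid
--     if lo == 0:
--         # nothing ahead: stop at the grid edge
--         u = 0 if sign == 1 else -(len(lab) - 1 if axis == 0 else len(lab[0]) - 1)
--     else:
--         u = line[lo - 1] + 1
--     pos = [None, None]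
--     pos[axis] = sign * u
--     pos[1 - axis] = gv
--     return (pos[0], pos[1])
-- ===== Notes on version B (the rewrite author's own statement) =====
-- stated objective: alternative
-- what changed: B replaces A's four-way table of filter/extremum/step-back lambdas by a coordinate canonicalization (axis+sign mapping every direction to 'facing smaller u'), a single sort of the on-line projections, and a hand-rolled bisect_left binary search whose predecessor gives the stopping cell.
import Mathlib
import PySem

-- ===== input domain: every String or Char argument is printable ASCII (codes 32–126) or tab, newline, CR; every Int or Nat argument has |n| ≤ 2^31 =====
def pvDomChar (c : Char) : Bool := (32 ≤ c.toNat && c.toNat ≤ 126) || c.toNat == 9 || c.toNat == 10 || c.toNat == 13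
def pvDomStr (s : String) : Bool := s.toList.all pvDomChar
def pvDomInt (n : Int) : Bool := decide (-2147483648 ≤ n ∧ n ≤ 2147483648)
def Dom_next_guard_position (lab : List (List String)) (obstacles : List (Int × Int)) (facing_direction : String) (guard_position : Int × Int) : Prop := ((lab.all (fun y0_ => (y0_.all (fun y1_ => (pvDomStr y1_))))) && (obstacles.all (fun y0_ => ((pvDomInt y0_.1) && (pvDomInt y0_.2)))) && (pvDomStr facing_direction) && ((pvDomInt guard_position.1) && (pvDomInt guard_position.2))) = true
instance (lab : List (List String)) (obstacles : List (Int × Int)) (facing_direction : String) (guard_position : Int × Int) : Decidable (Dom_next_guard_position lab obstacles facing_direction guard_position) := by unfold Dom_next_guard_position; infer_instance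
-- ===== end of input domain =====

-- B replaces A's four-way lambda table by coordinate canonicalization, one sort of the
-- on-line projections and a hand-rolled bisect predecessor search (objective: alternative).


-- ===== PORT A =====
-- shared shape of A's four dict entries: filter, then edge / nearest-then-step-back
def pvNearestDispatch (obstacles : List (Int × Int)) (pred : Int × Int → Bool)
    (edge : Int × Int) (nearest : List (Int × Int) → Option (Int × Int))
    (next : Int × Int → Int × Int) : Int × Int :=
  let possible := obstacles.filter pred
  if possible.isEmpty then edge
  else
    match nearest possible with
    | some o => next o
    | none => edge      -- unreachable: possible is nonempty

def next_guard_position (lab : List (List String)) (obstacles : List (Int × Int)) (facing_direction : String) (guard_position : Int × Int) : Int × Int :=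
  let row_pos := guard_position.1
  let col_pos := guard_position.2
  if facing_direction = "UP" then
    pvNearestDispatch obstacles (fun o => decide (o.1 < row_pos) && decide (o.2 = col_pos))
      (0, col_pos) (fun l => PySem.List.max? l (fun x => x.1)) (fun o => (o.1 + 1, o.2))
  else if facing_direction = "DOWN" then
    pvNearestDispatch obstacles (fun o => decide (row_pos < o.1) && decide (o.2 = col_pos))
      ((lab.length : Int) - 1, col_pos) (fun l => PySem.List.min? l (fun x => x.1)) (fun o => (o.1 - 1, o.2))
  else if facing_direction = "LEFT" then
    pvNearestDispatch obstacles (fun o => decide (o.2 < col_pos) && decide (o.1 = row_pos))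
      (row_pos, 0) (fun l => PySem.List.max? l (fun x => x.2)) (fun o => (o.1, o.2 + 1))
  else if facing_direction = "RIGHT" then
    pvNearestDispatch obstacles (fun o => decide (col_pos < o.2) && decide (o.1 = row_pos))
      (row_pos, ((lab.headD []).length : Int) - 1) (fun l => PySem.List.min? l (fun x => x.2)) (fun o => (o.1, o.2 - 1))
  else (row_pos, col_pos)   -- Python raises KeyError here; excluded by Pre_

-- ===== PORT B =====
-- Source B's hand-rolled bisect_left: first index in line[lo:hi] whose value is ≥ gu;
-- the fuel argument (hi - lo bounds the iterations) only makes the while-loop total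
def pvSearchGo (line : List Int) (gu : Int) : Nat → Nat → Nat → Nat
  | 0, lo, _ => lo
  | fuel + 1, lo, hi =>
    if lo < hi then
      let mid := (lo + hi) / 2
      if line.getD mid 0 < gu then pvSearchGo line gu fuel (mid + 1) hi
      else pvSearchGo line gu fuel lo mid
    else lo

def pvSearch (line : List Int) (gu : Int) (lo hi : Nat) : Nat :=
  pvSearchGo line gu (hi - lo) lo hi

def next_guard_position_alt (lab : List (List String)) (obstacles : List (Int × Int)) (facing_direction : String) (guard_position : Int × Int) : Int × Int :=
  let p : Nat × Int :=
    if facing_direction = "UP" then (0, 1)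
    else if facing_direction = "DOWN" then (0, -1)
    else if facing_direction = "LEFT" then (1, 1)
    else if facing_direction = "RIGHT" then (1, -1)
    else (2, 0)   -- Python raises KeyError here; excluded by Pre_
  if p.1 == 2 then guard_position
  else
    let axis := p.1
    let sign := p.2
    let gu := sign * (if axis == 0 then guard_position.1 else guard_position.2)
    let gv := if axis == 0 then guard_position.2 else guard_position.1
    let line := PySem.List.sorted
      ((obstacles.filter (fun o => decide ((if axis == 0 then o.2 else o.1) = gv))).map
        (fun o => sign * (if axis == 0 then o.1 else o.2))) (fun x => x) false
    let lo := pvSearch line gu 0 line.length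
    let u : Int :=
      if lo == 0 then
        (if sign == 1 then 0
         else -((if axis == 0 then (lab.length : Int) else ((lab.headD []).length : Int)) - 1))
      else line.getD (lo - 1) 0 + 1
    if axis == 0 then (sign * u, gv) else (gv, sign * u)

-- ===== PRECONDITION & SPEC =====
-- Pre_ excludes exactly the inputs where A raises: an unknown direction (KeyError), and
-- "RIGHT" with an empty lab and no obstacle to the guard's right (IndexError on lab[0]).
def Pre_next_guard_position (lab : List (List String)) (obstacles : List (Int × Int)) (facing_direction : String) (guard_position : Int × Int) : Prop :=
  (facing_direction = "UP" ∨ facing_direction = "DOWN" ∨ facing_direction = "LEFT" ∨ facing_direction = "RIGHT") ∧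
  (facing_direction = "RIGHT" → lab = [] → ∃ o ∈ obstacles, o.1 = guard_position.1 ∧ guard_position.2 < o.2)
instance (lab : List (List String)) (obstacles : List (Int × Int)) (facing_direction : String) (guard_position : Int × Int) : Decidable (Pre_next_guard_position lab obstacles facing_direction guard_position) := by unfold Pre_next_guard_position; infer_instance
def pvWitness_next_guard_position : List (List String) × (List (Int × Int)) × String × (Int × Int) :=
  ([[".", "."], [".", "."]], [(0, 1)], "UP", (1, 1))
def Spec_next_guard_position (lab : List (List String)) (obstacles : List (Int × Int)) (facing_direction : String) (guard_position : Int × Int) (out : Int × Int) : Prop := out = next_guard_position_alt lab obstacles facing_direction guard_position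
instance (lab : List (List String)) (obstacles : List (Int × Int)) (facing_direction : String) (guard_position : Int × Int) (out : Int × Int) : Decidable (Spec_next_guard_position lab obstacles facing_direction guard_position out) := by unfold Spec_next_guard_position; infer_instance

-- ===== CLAIM =====
def Claim_equal_next_guard_position : Prop := ∀ (lab : List (List String)) (obstacles : List (Int × Int)) (facing_direction : String) (guard_position : Int × Int), Dom_next_guard_position lab obstacles facing_direction guard_position → Pre_next_guard_position lab obstacles facing_direction guard_position → Spec_next_guard_position lab obstacles facing_direction guard_position (next_guard_position lab obstacles facing_direction guard_position)

-- ===== LEMMAS AND PROOFS =====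
-- bisect_left invariant on an ascending list: the result splits it at gu
theorem pvSearchGo_spec (L : List Int) (gu : Int)
    (hmono : ∀ p q : Nat, (hpq : p ≤ q) → (h : q < L.length) → L[p]'(by omega) ≤ L[q]) :
    ∀ (n lo hi : Nat), hi - lo ≤ n → lo ≤ hi → hi ≤ L.length →
    (∀ i : Nat, i < lo → (h : i < L.length) → L[i] < gu) →
    (∀ i : Nat, hi ≤ i → (h : i < L.length) → gu ≤ L[i]) →
    pvSearchGo L gu n lo hi ≤ L.length ∧
    (∀ i : Nat, i < pvSearchGo L gu n lo hi → (h : i < L.length) → L[i] < gu) ∧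
    (∀ i : Nat, pvSearchGo L gu n lo hi ≤ i → (h : i < L.length) → gu ≤ L[i]) := by
  intro n
  induction n with
  | zero =>
    intro lo hi hn hlh hhl hlow hhigh
    have : lo = hi := by omega
    rw [pvSearchGo]
    exact ⟨by omega, fun i hi' h => hlow i (by omega) h, fun i hi' h => hhigh i (by omega) h⟩
  | succ n ihn =>
    intro lo hi hn hlh hhl hlow hhigh
    rw [pvSearchGo]
    by_cases h : lo < hi
    · rw [if_pos h]
      have hmid1 : lo ≤ (lo + hi) / 2 := by omega
      have hmid2 : (lo + hi) / 2 < hi := by omega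
      have hmlen : (lo + hi) / 2 < L.length := by omega
      have hget : L.getD ((lo + hi) / 2) 0 = L[(lo + hi) / 2] := List.getD_eq_getElem L 0 hmlen
      by_cases hc : L.getD ((lo + hi) / 2) 0 < gu
      · rw [if_pos hc]
        refine ihn ((lo + hi) / 2 + 1) hi (by omega) (by omega) hhl ?_ hhigh
        intro i hi' h'
        by_cases hil : i < lo
        · exact hlow i hil h'
        · calc L[i] ≤ L[(lo + hi) / 2] := hmono i _ (by omega) hmlen
            _ < gu := by rw [← hget]; exact hc
      · rw [if_neg hc]
        refine ihn lo ((lo + hi) / 2) (by omega) (by omega) (by omega) hlow ?_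
        intro i hi' h'
        calc gu ≤ L[(lo + hi) / 2] := by rw [← hget]; omega
          _ ≤ L[i] := hmono _ i (by omega) h'
    · rw [if_neg h]
      exact ⟨by omega, fun i hi' h' => hlow i (by omega) h', fun i hi' h' => hhigh i (by omega) h'⟩

theorem pvSearch_spec (L : List Int) (gu : Int)
    (hmono : ∀ p q : Nat, (hpq : p ≤ q) → (h : q < L.length) → L[p]'(by omega) ≤ L[q])
    (lo hi : Nat) (hlh : lo ≤ hi) (hhl : hi ≤ L.length)
    (hlow : ∀ i : Nat, i < lo → (h : i < L.length) → L[i] < gu)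
    (hhigh : ∀ i : Nat, hi ≤ i → (h : i < L.length) → gu ≤ L[i]) :
    pvSearch L gu lo hi ≤ L.length ∧
    (∀ i : Nat, i < pvSearch L gu lo hi → (h : i < L.length) → L[i] < gu) ∧
    (∀ i : Nat, pvSearch L gu lo hi ≤ i → (h : i < L.length) → gu ≤ L[i]) := by
  unfold pvSearch
  exact pvSearchGo_spec L gu hmono (hi - lo) lo hi (le_refl _) hlh hhl hlow hhigh

-- the bisect predecessor over the sorted projections IS the maximum of f over A's filter
theorem pv_core (obstacles : List (Int × Int)) (f : Int × Int → Int) (qb : Int × Int → Bool) (gu : Int) :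
    let L := PySem.List.sorted ((obstacles.filter qb).map f) (fun x => x) false
    let k := pvSearch L gu 0 L.length
    let cand := obstacles.filter (fun o => decide (f o < gu) && qb o)
    (k = 0 ↔ cand = []) ∧
    (∀ o ∈ cand, f o ≤ L.getD (k - 1) 0) ∧
    (k ≠ 0 → L.getD (k - 1) 0 < gu ∧ ∃ o ∈ cand, f o = L.getD (k - 1) 0) := by
  intro L k cand
  have hmono : ∀ p q : Nat, (hpq : p ≤ q) → (h : q < L.length) → L[p]'(by omega) ≤ L[q] := by
    intro p q hpq h
    exact PySem.List.sorted_id_getElem_mono _ hpq h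
  obtain ⟨hklen, hlt, hge⟩ := pvSearch_spec L gu hmono 0 L.length (by omega) (le_refl _)
    (by omega) (fun i hi h => by omega)
  have hmemL : ∀ x : Int, x ∈ L ↔ ∃ o ∈ obstacles.filter qb, f o = x := by
    intro x
    rw [PySem.List.mem_sorted]
    exact List.mem_map
  have hcand : ∀ o : Int × Int, o ∈ cand ↔ o ∈ obstacles ∧ f o < gu ∧ qb o = true := by
    intro o
    constructor
    · intro h
      have := List.mem_filter.mp h
      simp only [Bool.and_eq_true, decide_eq_true_eq] at this
      exact ⟨this.1, this.2.1, this.2.2⟩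
    · intro ⟨h1, h2, h3⟩
      exact List.mem_filter.mpr ⟨h1, by simp only [Bool.and_eq_true, decide_eq_true_eq]; exact ⟨h2, h3⟩⟩
  -- any candidate's projection sits strictly below index k
  have hidx : ∀ o ∈ cand, ∃ i : Nat, ∃ h : i < L.length, i < k ∧ L[i] = f o := by
    intro o ho
    obtain ⟨h1, h2, h3⟩ := (hcand o).mp ho
    have hfo : f o ∈ L := (hmemL (f o)).mpr ⟨o, List.mem_filter.mpr ⟨h1, h3⟩, rfl⟩
    obtain ⟨i, hil, hieq⟩ := List.mem_iff_getElem.mp hfo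
    refine ⟨i, hil, ?_, hieq⟩
    by_contra hik
    have := hge i (by omega) hil
    omega
  constructor
  · constructor
    · intro hk0
      by_contra hne
      obtain ⟨o, ho⟩ := List.exists_mem_of_ne_nil cand hne
      obtain ⟨i, h, hik, _⟩ := hidx o ho
      omega
    · intro hcnil
      by_contra hk0
      have hk1 : k - 1 < L.length := by omega
      have hlt' : L[k-1] < gu := hlt (k-1) (by omega) hk1
      obtain ⟨o, ho, hfo⟩ := (hmemL (L[k-1])).mp (List.getElem_mem hk1)
      have hof := List.mem_filter.mp ho
      have : o ∈ cand := (hcand o).mpr ⟨hof.1, by omega, hof.2⟩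
      rw [hcnil] at this
      exact absurd this (List.not_mem_nil)
  constructor
  · intro o ho
    obtain ⟨i, h, hik, hieq⟩ := hidx o ho
    have hk1 : k - 1 < L.length := by omega
    have := hmono i (k-1) (by omega) hk1
    rw [List.getD_eq_getElem L 0 hk1]
    omega
  · intro hk0
    have hk1 : k - 1 < L.length := by omega
    have hlt' : L[k-1] < gu := hlt (k-1) (by omega) hk1
    obtain ⟨o, ho, hfo⟩ := (hmemL (L[k-1])).mp (List.getElem_mem hk1)
    have hof := List.mem_filter.mp ho
    rw [List.getD_eq_getElem L 0 hk1]
    refine ⟨hlt', o, (hcand o).mpr ⟨hof.1, by omega, hof.2⟩, hfo⟩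

theorem alt_up (lab : List (List String)) (obstacles : List (Int × Int)) (r c : Int) :
    next_guard_position_alt lab obstacles "UP" (r, c) =
    (let L := PySem.List.sorted ((obstacles.filter (fun o => decide (o.2 = c))).map (fun o => o.1)) (fun x => x) false
     let k := pvSearch L r 0 L.length
     ((if k == 0 then 0 else L.getD (k - 1) 0 + 1), c)) := by
  simp [next_guard_position_alt]

theorem alt_down (lab : List (List String)) (obstacles : List (Int × Int)) (r c : Int) :
    next_guard_position_alt lab obstacles "DOWN" (r, c) =
    (let L := PySem.List.sorted ((obstacles.filter (fun o => decide (o.2 = c))).map (fun o => -o.1)) (fun x => x) false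
     let k := pvSearch L (-r) 0 L.length
     ((if k == 0 then (lab.length : Int) - 1 else -(L.getD (k - 1) 0 + 1)), c)) := by
  simp [next_guard_position_alt]

theorem alt_left (lab : List (List String)) (obstacles : List (Int × Int)) (r c : Int) :
    next_guard_position_alt lab obstacles "LEFT" (r, c) =
    (let L := PySem.List.sorted ((obstacles.filter (fun o => decide (o.1 = r))).map (fun o => o.2)) (fun x => x) false
     let k := pvSearch L c 0 L.length
     (r, (if k == 0 then 0 else L.getD (k - 1) 0 + 1))) := by
  simp [next_guard_position_alt]

theorem alt_right (lab : List (List String)) (obstacles : List (Int × Int)) (r c : Int) :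
    next_guard_position_alt lab obstacles "RIGHT" (r, c) =
    (let L := PySem.List.sorted ((obstacles.filter (fun o => decide (o.1 = r))).map (fun o => -o.2)) (fun x => x) false
     let k := pvSearch L (-c) 0 L.length
     (r, (if k == 0 then ((lab.headD []).length : Int) - 1 else -(L.getD (k - 1) 0 + 1)))) := by
  simp [next_guard_position_alt]

theorem pv_case_up (lab : List (List String)) (obstacles : List (Int × Int)) (r c : Int) :
    next_guard_position lab obstacles "UP" (r, c) = next_guard_position_alt lab obstacles "UP" (r, c) := by
  rw [alt_up]
  obtain ⟨h1, h2, h3⟩ := pv_core obstacles (fun o => o.1) (fun o => decide (o.2 = c)) r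
  simp only [next_guard_position, pvNearestDispatch, String.reduceEq, reduceIte]
  set L := PySem.List.sorted ((obstacles.filter (fun o => decide (o.2 = c))).map (fun o => o.1)) (fun x => x) false with hL
  set k := pvSearch L r 0 L.length with hk
  set cand := obstacles.filter (fun o => decide (o.1 < r) && decide (o.2 = c)) with hcand
  by_cases hk0 : k = 0
  · have hce : cand = [] := h1.mp hk0
    simp [hce, hk0]
  · obtain ⟨hglt, o', ho'm, ho'v⟩ := h3 hk0
    have hne : cand ≠ [] := fun h => hk0 (h1.mpr h)
    cases hmax : PySem.List.max? cand (fun x => x.1) with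
    | none => exact absurd ((PySem.List.max?_eq_none_iff _ _).mp hmax) hne
    | some o =>
      have hom := PySem.List.max?_mem hmax
      have hoc : o.2 = c := by
        have := (List.mem_filter.mp hom).2
        simp only [Bool.and_eq_true, decide_eq_true_eq] at this
        exact this.2
      have h5 : o'.1 ≤ o.1 := PySem.List.max?_isMax hmax o' ho'm
      have h6 : o.1 ≤ L.getD (k - 1) 0 := h2 o hom
      simp only [List.isEmpty_iff, hne, if_false, hk0, beq_iff_eq]
      rw [Prod.mk.injEq]
      exact ⟨by omega, hoc⟩

theorem pv_case_down (lab : List (List String)) (obstacles : List (Int × Int)) (r c : Int) :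
    next_guard_position lab obstacles "DOWN" (r, c) = next_guard_position_alt lab obstacles "DOWN" (r, c) := by
  rw [alt_down]
  obtain ⟨h1, h2, h3⟩ := pv_core obstacles (fun o => -o.1) (fun o => decide (o.2 = c)) (-r)
  have hfe : obstacles.filter (fun o => decide (-o.1 < -r) && decide (o.2 = c)) =
      obstacles.filter (fun o => decide (r < o.1) && decide (o.2 = c)) := by
    apply List.filter_congr
    intro x _
    have : decide (-x.1 < -r) = decide (r < x.1) := decide_eq_decide.mpr (by omega)
    rw [this]
  rw [hfe] at h1 h2 h3
  simp only [next_guard_position, pvNearestDispatch, String.reduceEq, reduceIte]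
  set L := PySem.List.sorted ((obstacles.filter (fun o => decide (o.2 = c))).map (fun o => -o.1)) (fun x => x) false with hL
  set k := pvSearch L (-r) 0 L.length with hk
  set cand := obstacles.filter (fun o => decide (r < o.1) && decide (o.2 = c)) with hcand
  by_cases hk0 : k = 0
  · have hce : cand = [] := h1.mp hk0
    simp [hce, hk0]
  · obtain ⟨hglt, o', ho'm, ho'v⟩ := h3 hk0
    have hne : cand ≠ [] := fun h => hk0 (h1.mpr h)
    cases hmin : PySem.List.min? cand (fun x => x.1) with
    | none => exact absurd ((PySem.List.min?_eq_none_iff _ _).mp hmin) hne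
    | some o =>
      have hom := PySem.List.min?_mem hmin
      have hoc : o.2 = c := by
        have := (List.mem_filter.mp hom).2
        simp only [Bool.and_eq_true, decide_eq_true_eq] at this
        exact this.2
      have h5 : o.1 ≤ o'.1 := PySem.List.min?_isMin hmin o' ho'm
      have h6 : -o.1 ≤ L.getD (k - 1) 0 := h2 o hom
      simp only [List.isEmpty_iff, hne, if_false, hk0, beq_iff_eq]
      rw [Prod.mk.injEq]
      exact ⟨by omega, hoc⟩

theorem pv_case_left (lab : List (List String)) (obstacles : List (Int × Int)) (r c : Int) :
    next_guard_position lab obstacles "LEFT" (r, c) = next_guard_position_alt lab obstacles "LEFT" (r, c) := by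
  rw [alt_left]
  obtain ⟨h1, h2, h3⟩ := pv_core obstacles (fun o => o.2) (fun o => decide (o.1 = r)) c
  simp only [next_guard_position, pvNearestDispatch, String.reduceEq, reduceIte]
  set L := PySem.List.sorted ((obstacles.filter (fun o => decide (o.1 = r))).map (fun o => o.2)) (fun x => x) false with hL
  set k := pvSearch L c 0 L.length with hk
  set cand := obstacles.filter (fun o => decide (o.2 < c) && decide (o.1 = r)) with hcand
  by_cases hk0 : k = 0
  · have hce : cand = [] := h1.mp hk0
    simp [hce, hk0]
  · obtain ⟨hglt, o', ho'm, ho'v⟩ := h3 hk0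
    have hne : cand ≠ [] := fun h => hk0 (h1.mpr h)
    cases hmax : PySem.List.max? cand (fun x => x.2) with
    | none => exact absurd ((PySem.List.max?_eq_none_iff _ _).mp hmax) hne
    | some o =>
      have hom := PySem.List.max?_mem hmax
      have hor : o.1 = r := by
        have := (List.mem_filter.mp hom).2
        simp only [Bool.and_eq_true, decide_eq_true_eq] at this
        exact this.2
      have h5 : o'.2 ≤ o.2 := PySem.List.max?_isMax hmax o' ho'm
      have h6 : o.2 ≤ L.getD (k - 1) 0 := h2 o hom
      simp only [List.isEmpty_iff, hne, if_false, hk0, beq_iff_eq]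
      rw [Prod.mk.injEq]
      exact ⟨hor, by omega⟩

theorem pv_case_right (lab : List (List String)) (obstacles : List (Int × Int)) (r c : Int) :
    next_guard_position lab obstacles "RIGHT" (r, c) = next_guard_position_alt lab obstacles "RIGHT" (r, c) := by
  rw [alt_right]
  obtain ⟨h1, h2, h3⟩ := pv_core obstacles (fun o => -o.2) (fun o => decide (o.1 = r)) (-c)
  have hfe : obstacles.filter (fun o => decide (-o.2 < -c) && decide (o.1 = r)) =
      obstacles.filter (fun o => decide (c < o.2) && decide (o.1 = r)) := by
    apply List.filter_congr
    intro x _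
    have : decide (-x.2 < -c) = decide (c < x.2) := decide_eq_decide.mpr (by omega)
    rw [this]
  rw [hfe] at h1 h2 h3
  simp only [next_guard_position, pvNearestDispatch, String.reduceEq, reduceIte]
  set L := PySem.List.sorted ((obstacles.filter (fun o => decide (o.1 = r))).map (fun o => -o.2)) (fun x => x) false with hL
  set k := pvSearch L (-c) 0 L.length with hk
  set cand := obstacles.filter (fun o => decide (c < o.2) && decide (o.1 = r)) with hcand
  by_cases hk0 : k = 0
  · have hce : cand = [] := h1.mp hk0
    simp [hce, hk0]
  · obtain ⟨hglt, o', ho'm, ho'v⟩ := h3 hk0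
    have hne : cand ≠ [] := fun h => hk0 (h1.mpr h)
    cases hmin : PySem.List.min? cand (fun x => x.2) with
    | none => exact absurd ((PySem.List.min?_eq_none_iff _ _).mp hmin) hne
    | some o =>
      have hom := PySem.List.min?_mem hmin
      have hor : o.1 = r := by
        have := (List.mem_filter.mp hom).2
        simp only [Bool.and_eq_true, decide_eq_true_eq] at this
        exact this.2
      have h5 : o.2 ≤ o'.2 := PySem.List.min?_isMin hmin o' ho'm
      have h6 : -o.2 ≤ L.getD (k - 1) 0 := h2 o hom
      simp only [List.isEmpty_iff, hne, if_false, hk0, beq_iff_eq]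
      rw [Prod.mk.injEq]
      exact ⟨hor, by omega⟩

-- ===== VERDICT =====
theorem next_guard_position_spec : Claim_equal_next_guard_position := by
  intro lab obstacles facing_direction guard_position _ hpre
  obtain ⟨hd, -⟩ := hpre
  obtain ⟨r, c⟩ := guard_position
  show next_guard_position lab obstacles facing_direction (r, c) =
    next_guard_position_alt lab obstacles facing_direction (r, c)
  rcases hd with h | h | h | h <;> subst h
  · exact pv_case_up lab obstacles r c
  · exact pv_case_down lab obstacles r c
  · exact pv_case_left lab obstacles r c
  · exact pv_case_right lab obstacles r c
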